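/- GENERATED by farm/mkstatement.py from design/units.tsv (unit `DGifGetScreenDesc.3`) and the assertions of Gif/Spec/Seg_DGifGetScreenDesc.lean — do not edit.
   THE STATEMENT of the proof unit `DGifGetScreenDesc.3`: segment 3 of `DGifGetScreenDesc` (29 instructions; entries 0x108152;
   exits 0x108211,0x1080f7; ranges 0x108152-0x1081d1)
   takes each of its entry assertions to one of its exit assertions (`Gif.Spec.DGifGetScreenDesc.Seg3`), given the contracts of its callees.
   What the names mean: ProgX/Base/Spec/Basic.lean (the shared hypotheses), Gif/Spec/Seg_DGifGetScreenDesc.lean (the assertions). The theorem to prove: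
   `theorem DGifGetScreenDesc_3_ok : Gif.Spec.DGifGetScreenDesc_3.Statement`. -/
import Gif.Code
import Gif.Dec.All
import Gif.Labels
import Gif.Spec.Seg_DGifGetScreenDesc
namespace Gif.Spec.DGifGetScreenDesc_3
open X86 X86.User Asan

/-- The statement of unit `DGifGetScreenDesc.3`. -/
def Statement : Prop :=
  ∀ (Lay : Layout) (_hLay : Lay.hi = 0x1000000) (μ : Microarch) (_hμ : UserX.MicroOK μ) (u₀ : State)
    (_hcode : HasCodeNat Lay u₀ Gif.L.DGifGetScreenDesc.entry Gif.Code.code_DGifGetScreenDesc.nat Gif.L.DGifGetScreenDesc.size)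
    (_h_asan_store4_noabort : Asan.SmallCheck Lay μ ProgX.Base.WayInv (ProgX.Base.CodeOK u₀) [.rax, .rcx, .rdx] 4 ProgX.Base.L.__asan_store4_noabort.entry)
    (_h_asan_store1_noabort : Asan.SmallCheck Lay μ ProgX.Base.WayInv (ProgX.Base.CodeOK u₀) [.rax, .rdx] 1 ProgX.Base.L.__asan_store1_noabort.entry)
    (_h_asan_store8_noabort : Asan.SmallCheck Lay μ ProgX.Base.WayInv (ProgX.Base.CodeOK u₀) [.rax, .rcx, .rdx] 8 ProgX.Base.L.__asan_store8_noabort.entry),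
    Gif.Spec.DGifGetScreenDesc.Seg3 Lay μ u₀

end Gif.Spec.DGifGetScreenDesc_3
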